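-- pv_equiv track=rewrite | github.com/fedear402/Programacion-Aplicada | new.py | convolucion
-- ===== SOURCE A (Python) =====
-- def convolucion(a, b):
--     out_len = len(a)+len(b)-1
--     out = [0] * out_len
--     for n in range(out_len):
--         aux = []
--         for i in range(min(n + 1, len(a))):
--             aux.append(a[i] * (0 if n-i >= len(b) else b[n-i]) )
--         out[n] = sum(aux)
--
--     return out
-- ===== SOURCE B (Python) =====
-- def convolucion(a, b):
--     out = [0] * (len(a) + len(b) - 1)
--     for i in range(len(a)):
--         ai = a[i]
--         for j in range(len(b)):
--             out[i + j] += ai * b[j]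
--     return out
-- ===== Notes on version B (the rewrite author's own statement) =====
-- stated objective: idiomatic
-- what changed: Replaces A's output-centric gather (per output index n, a min()-bounded inner scan with an out-of-range guard and a temporary list summed) by the standard scatter convolution: a plain double loop over input indices accumulating out[i+j] += a[i]*b[j], with no boundary tests and no temporary list.
import Mathlib
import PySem

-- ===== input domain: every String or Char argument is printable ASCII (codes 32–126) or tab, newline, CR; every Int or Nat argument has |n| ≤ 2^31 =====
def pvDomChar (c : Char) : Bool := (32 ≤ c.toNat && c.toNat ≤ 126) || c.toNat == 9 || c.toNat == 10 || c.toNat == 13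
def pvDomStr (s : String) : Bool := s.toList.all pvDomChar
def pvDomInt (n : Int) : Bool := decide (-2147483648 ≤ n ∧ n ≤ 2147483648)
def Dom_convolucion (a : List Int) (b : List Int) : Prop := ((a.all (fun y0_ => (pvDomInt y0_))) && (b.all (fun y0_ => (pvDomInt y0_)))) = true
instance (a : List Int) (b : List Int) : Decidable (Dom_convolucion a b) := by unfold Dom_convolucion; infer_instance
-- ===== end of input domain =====

-- B replaces A's gather loop (per output index, a min()-bounded scan with a
-- range guard and a temporary list) by the idiomatic scatter double loop
-- out[i+j] += a[i]*b[j]; same O(|a|*|b|) cost, no boundary tests.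

-- ===== PORT A =====
def convolucion (a : List Int) (b : List Int) : List Int :=
  let outLen : Int := (a.length : Int) + (b.length : Int) - 1
  let out : List Int := List.replicate outLen.toNat 0
  (PySem.List.pyRange 0 outLen 1).foldl (fun out n =>
    let aux : List Int :=
      (PySem.List.pyRange 0 (min (n + 1) ((a.length : Int))) 1).foldl
        (fun aux i =>
          aux ++ [PySem.List.pyGetD a i 0 *
            (if ((b.length : Int)) ≤ n - i then 0 else PySem.List.pyGetD b (n - i) 0)]) []
    PySem.List.pySetD out n aux.sum) out

-- ===== PORT B =====
def convolucion_alt (a : List Int) (b : List Int) : List Int :=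
  let out : List Int := List.replicate ((a.length : Int) + (b.length : Int) - 1).toNat 0
  (List.range a.length).foldl (fun out i =>
    let ai := a.getD i 0
    (List.range b.length).foldl (fun out j =>
      out.set (i + j) (out.getD (i + j) 0 + ai * b.getD j 0)) out) out

-- ===== PRECONDITION & SPEC =====
def Spec_convolucion (a : List Int) (b : List Int) (out : List Int) : Prop := out = convolucion_alt a b
instance (a : List Int) (b : List Int) (out : List Int) : Decidable (Spec_convolucion a b out) := by unfold Spec_convolucion; infer_instance

-- ===== CLAIM (what is proved, stated in full; the proofs are below) =====
def Claim_equal_convolucion : Prop := ∀ (a : List Int) (b : List Int), Dom_convolucion a b → Spec_convolucion a b (convolucion a b)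

-- ===== LEMMAS AND PROOFS =====

-- A's loop writes each cell once, in order: it is a map over the index range.
theorem pv_foldl_set_eq_map (f : Nat → Int) :
    ∀ (m : Nat) (init : List Int), m ≤ init.length →
      (List.range m).foldl (fun o k => o.set k (f k)) init
        = (List.range m).map f ++ init.drop m := by
  intro m
  induction m with
  | zero => intro init _; simp
  | succ m ih =>
    intro init h
    have hm : m < init.length := by omega
    rw [List.range_succ, List.foldl_append, ih init (by omega)]
    apply List.ext_getElem?
    intro k
    simp only [List.foldl_cons, List.foldl_nil, List.getElem?_set, List.getElem?_append,
      List.length_append, List.length_map, List.length_range, List.getElem?_map,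
      List.getElem?_drop]
    by_cases hk : k = m
    · subst hk; simp [hm]
    · simp
      split_ifs with h1 h2 h3 h4 <;> simp_all <;> omega

-- folds whose step preserves length preserve length
theorem pv_foldl_length {α : Type} (g : List Int → α → List Int)
    (h : ∀ o x, (g o x).length = o.length) :
    ∀ (l : List α) (init : List Int), (l.foldl g init).length = init.length := by
  intro l
  induction l with
  | nil => intro init; rfl
  | cons x t ih => intro init; rw [List.foldl_cons, ih, h]

-- B's inner loop, pointwise
theorem pv_inner_length (b : List Int) (ai : Int) (i : Nat) (n : Nat) (out : List Int) :
    ((List.range n).foldl (fun o j => o.set (i + j) (o.getD (i + j) 0 + ai * b.getD j 0)) out).length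
      = out.length := by
  exact pv_foldl_length _ (by intro o x; simp) _ out

theorem pv_inner (b : List Int) (ai : Int) (i : Nat) :
    ∀ (n : Nat) (out : List Int) (k : Nat), i + n ≤ out.length →
      ((List.range n).foldl (fun o j => o.set (i + j) (o.getD (i + j) 0 + ai * b.getD j 0)) out).getD k 0
        = out.getD k 0 + (if i ≤ k ∧ k - i < n then ai * b.getD (k - i) 0 else 0) := by
  intro n
  induction n with
  | zero => intro out k _; simp
  | succ n ih =>
    intro out k h
    have hlen : ((List.range n).foldl
        (fun o j => o.set (i + j) (o.getD (i + j) 0 + ai * b.getD j 0)) out).length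
        = out.length := pv_inner_length b ai i n out
    rw [List.range_succ, List.foldl_append, List.foldl_cons, List.foldl_nil]
    rw [List.getD_eq_getElem?_getD, List.getElem?_set]
    by_cases hk : i + n = k
    · have hin : i + n < out.length := by omega
      rw [if_pos hk]
      rw [if_pos (by omega : i + n < _ )]
      simp only [Option.getD_some]
      rw [ih out (i + n) (by omega)]
      have : ¬ (i ≤ i + n ∧ i + n - i < n) := by omega
      rw [if_neg this, if_pos (by omega : i ≤ k ∧ k - i < n + 1)]
      have : k - i = n := by omega
      rw [this, hk]; ring
    · rw [if_neg hk, ← List.getD_eq_getElem?_getD, ih out k (by omega)]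
      by_cases hc : i ≤ k ∧ k - i < n
      · rw [if_pos hc, if_pos (by omega)]
      · rw [if_neg hc, if_neg (by omega)]

-- B's outer loop, pointwise
theorem pv_outer (a b : List Int) :
    ∀ (la : Nat) (out : List Int) (k : Nat), (∀ i, i < la → i + b.length ≤ out.length) →
      ((List.range la).foldl (fun o i =>
          (List.range b.length).foldl
            (fun o j => o.set (i + j) (o.getD (i + j) 0 + a.getD i 0 * b.getD j 0)) o) out).getD k 0
        = out.getD k 0 + ((List.range la).map (fun i =>
            if i ≤ k ∧ k - i < b.length then a.getD i 0 * b.getD (k - i) 0 else 0)).sum := by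
  intro la
  induction la with
  | zero => intro out k _; simp
  | succ la ih =>
    intro out k h
    have hlen : ((List.range la).foldl (fun o i =>
        (List.range b.length).foldl
          (fun o j => o.set (i + j) (o.getD (i + j) 0 + a.getD i 0 * b.getD j 0)) o) out).length
        = out.length :=
      pv_foldl_length _ (fun o i => pv_inner_length b (a.getD i 0) i b.length o) _ out
    rw [List.range_succ, List.foldl_append, List.foldl_cons, List.foldl_nil]
    rw [pv_inner b (a.getD la 0) la b.length _ k (by rw [hlen]; exact h la (by omega))]
    rw [ih out k (fun i hi => h i (by omega))]
    rw [List.map_append, List.sum_append]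
    simp; ring

-- a sum over range n whose terms vanish from c on is the sum over range c
theorem pv_sum_tail_zero (h2 : Nat → Int) :
    ∀ (n c : Nat), c ≤ n → (∀ j, c ≤ j → h2 j = 0) →
      ((List.range n).map h2).sum = ((List.range c).map h2).sum := by
  intro n
  induction n with
  | zero => intro c hc _; have hc0 : c = 0 := Nat.le_zero.mp hc; rw [hc0]
  | succ n ih =>
    intro c hc hz
    by_cases h : c ≤ n
    · rw [List.range_succ, List.map_append, List.sum_append, ih c h hz]
      simp [hz n h]
    · have : c = n + 1 := by omega
      simp [this]

theorem convolucion_spec : Claim_equal_convolucion := by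
  unfold Claim_equal_convolucion
  intro a b _
  unfold Spec_convolucion
  simp only [convolucion, convolucion_alt]
  set m : Nat := ((a.length : Int) + (b.length : Int) - 1).toNat with hm
  rw [PySem.List.pyRange_one]
  rw [List.foldl_map]
  simp only [zero_add, sub_zero, PySem.List.pySetD_natCast, ← hm]
  rw [pv_foldl_set_eq_map _ m (List.replicate m 0) (by simp)]
  rw [List.drop_replicate]
  simp only [Nat.sub_self, List.replicate_zero, List.append_nil]
  apply List.ext_getElem
  · rw [List.length_map, List.length_range,
      pv_foldl_length _ (fun o i => pv_inner_length b (a.getD i 0) i b.length o) _ _]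
    simp
  intro k hk1 hk2
  rw [List.length_map, List.length_range] at hk1
  rw [List.getElem_map, List.getElem_range]
  rw [← List.getD_eq_getElem _ 0 hk2]
  rw [pv_outer a b a.length (List.replicate m 0) k
    (by intro i hi; simp only [List.length_replicate]; omega)]
  have hrep : (List.replicate m (0 : Int)).getD k 0 = 0 := by
    rw [List.getD_eq_getElem?_getD, List.getElem?_replicate]; split <;> simp
  rw [hrep, zero_add]
  rw [PySem.List.foldl_append_singleton_eq_map, List.nil_append]
  rw [PySem.List.pyRange_one]
  rw [List.map_map]
  set cN : Nat := (min ((k : Int) + 1) ((a.length : Int)) - 0).toNat with hc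
  have hcN : cN = min (k + 1) a.length := by omega
  have hstep : List.map ((fun i => PySem.List.pyGetD a i 0 *
        if (b.length : Int) ≤ (k : Int) - i then 0 else PySem.List.pyGetD b ((k : Int) - i) 0) ∘
        fun (j : Nat) => 0 + (j : Int)) (List.range cN)
      = List.map (fun j => if j ≤ k ∧ k - j < b.length then a.getD j 0 * b.getD (k - j) 0 else 0)
          (List.range cN) := by
    apply List.map_congr_left
    intro j hj
    rw [List.mem_range] at hj
    have hjk : j ≤ k := by omega
    have hcast : (0 : Int) + (j : Int) = (j : Int) := by omega
    have hsub : (k : Int) - (j : Int) = ((k - j : Nat) : Int) := by omega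
    simp only [Function.comp, hcast, hsub, PySem.List.pyGetD_natCast]
    by_cases hcond : k - j < b.length
    · rw [if_neg (by exact_mod_cast (by omega : ¬ (b.length ≤ k - j))), if_pos ⟨hjk, hcond⟩]
    · rw [if_pos (by exact_mod_cast (by omega : b.length ≤ k - j)), if_neg (by omega)]
      simp
  rw [hstep]
  rw [pv_sum_tail_zero _ a.length cN (by omega) ?_]
  intro j hj
  by_cases hja : j < a.length
  · rw [if_neg (by omega)]
  · by_cases hcond : j ≤ k ∧ k - j < b.length
    · rw [if_pos hcond]
      have h0 : a.getD j 0 = 0 := by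
        rw [List.getD_eq_getElem?_getD, List.getElem?_eq_none (by omega)]; rfl
      rw [h0, zero_mul]
    · rw [if_neg hcond]
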